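-- pv_equiv track=rewrite | github.com/danielnichiata96/mierutone | backend/app/services/pitch/patterns.py | get_pitch_pattern
-- ===== SOURCE A (Python) =====
-- def get_pitch_pattern(accent_type: int | None, mora_count: int) -> list[str]:
--     """Generate pitch pattern (H/L) based on accent type.
--
--     Japanese pitch accent rules:
--     - Type 0 (Heiban/平板): L-H-H-H... (rises and stays high)
--     - Type 1 (Atamadaka/頭高): H-L-L-L... (starts high, drops after 1st)
--     - Type N (Nakadaka/中高 or Odaka/尾高): L-H-...-H-L (drops after Nth mora)
--     """
--     if mora_count == 0:
--         return []
--
--     if mora_count == 1: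
--         return ["H"] if accent_type == 1 else ["L"]
--
--     if accent_type is None or accent_type < 0:
--         accent_type = 0
--
--     if accent_type == 0:
--         return ["L"] + ["H"] * (mora_count - 1)
--     elif accent_type == 1:
--         return ["H"] + ["L"] * (mora_count - 1)
--     else:
--         pattern = ["L"]
--         for i in range(2, mora_count + 1):
--             pattern.append("H" if i <= accent_type else "L")
--         return pattern
-- ===== SOURCE B (Python) =====
-- def get_pitch_pattern(accent_type: int | None, mora_count: int) -> list[str]:
--     """Generate pitch pattern (H/L) by computing the high-pitch interval in closed
--     form and concatenating three constant blocks L*pre + H*mid + L*post."""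
--     n = mora_count
--     a = accent_type if accent_type is not None and accent_type >= 0 else 0
--     # high-pitch moras form the contiguous interval [lo, hi] (1-based):
--     if a == 1:
--         lo, hi = 1, 1          # atamadaka: only the first mora is high
--     elif a == 0:
--         lo, hi = 2, n          # heiban: high from the 2nd mora to the end
--     else:
--         lo, hi = 2, min(a, n)  # nakadaka/odaka: high from the 2nd to the a-th mora
--     pre = min(lo - 1, n)
--     mid = min(hi, n) - (lo - 1)
--     post = n - max(hi, lo - 1)
--     return ["L"] * pre + ["H"] * mid + ["L"] * post
-- ===== Notes on version B (the rewrite author's own statement) =====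
-- stated objective: alternative
-- what changed: Instead of branch-specific list building and a per-position append loop, B computes the contiguous high-pitch interval [lo, hi] in closed form and emits the pattern as three constant replicated blocks L*pre + H*mid + L*post with arithmetically derived lengths; no per-mora iteration or predicate remains.
-- intended difference: For mora_count < 0 A falls through its branches and returns a spurious one-element list (['H'] if accent_type == 1 else ['L']), while B's block lengths are all non-positive so it returns [], the intended empty pattern for a non-positive mora count. — e.g. on get_pitch_pattern(some 0, -1): A returns ["L"], B returns []
import Mathlib
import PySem

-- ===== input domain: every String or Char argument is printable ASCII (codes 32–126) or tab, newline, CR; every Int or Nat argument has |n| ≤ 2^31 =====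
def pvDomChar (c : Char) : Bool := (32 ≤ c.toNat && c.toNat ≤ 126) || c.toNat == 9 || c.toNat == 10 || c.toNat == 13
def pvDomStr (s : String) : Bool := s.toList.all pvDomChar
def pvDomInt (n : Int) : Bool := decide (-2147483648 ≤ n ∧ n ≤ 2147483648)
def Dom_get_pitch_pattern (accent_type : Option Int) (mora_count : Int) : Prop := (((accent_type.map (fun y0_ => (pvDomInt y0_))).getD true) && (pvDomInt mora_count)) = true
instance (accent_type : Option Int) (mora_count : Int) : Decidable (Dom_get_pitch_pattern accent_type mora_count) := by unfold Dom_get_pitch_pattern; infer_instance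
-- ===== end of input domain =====

-- B computes the contiguous high-pitch interval [lo, hi] in closed form and emits three
-- constant replicated blocks L*pre + H*mid + L*post (objective: alternative decomposition,
-- no per-mora loop); on negative mora_count (see D_ below) B's block lengths are all
-- non-positive so it naturally returns [] where A returns a leftover one-element list.

-- ===== PORT A =====
def get_pitch_pattern (accent_type : Option Int) (mora_count : Int) : List String :=
  if mora_count = 0 then []
  else if mora_count = 1 then (if accent_type = some 1 then ["H"] else ["L"])
  else
    -- `accent_type = 0` reassignment when None or negative
    let a : Int := match accent_type with
      | none => 0
      | some v => if v < 0 then 0 else v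
    if a = 0 then ["L"] ++ List.replicate (mora_count - 1).toNat "H"   -- ["H"] * (mora_count-1)
    else if a = 1 then ["H"] ++ List.replicate (mora_count - 1).toNat "L"
    else (PySem.List.pyRange 2 (mora_count + 1) 1).foldl
           (fun pattern i => pattern ++ [if i ≤ a then "H" else "L"]) ["L"]

-- ===== PORT B =====
def get_pitch_pattern_alt (accent_type : Option Int) (mora_count : Int) : List String :=
  let n := mora_count
  let a : Int := match accent_type with
    | none => 0
    | some v => if v < 0 then 0 else v
  -- the branch `if a == 1: lo, hi = 1, 1  elif a == 0: lo, hi = 2, n  else: lo, hi = 2, min(a, n)`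
  let lo : Int := if a = 1 then 1 else 2
  let hi : Int := if a = 1 then 1 else if a = 0 then n else min a n
  -- ["L"]*k with k ≤ 0 is [] in Python; .toNat clamps identically
  List.replicate (min (lo - 1) n).toNat "L"
    ++ List.replicate (min hi n - (lo - 1)).toNat "H"
    ++ List.replicate (n - max hi (lo - 1)).toNat "L"

-- ===== PRECONDITION & SPEC =====
-- On mora_count < 0 A falls through its branches and returns a spurious ["L"] (or ["H"]
-- for accent 1) while B returns the intended empty pattern [] for a non-positive mora count.
def D_get_pitch_pattern (accent_type : Option Int) (mora_count : Int) : Prop := mora_count < 0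
instance (accent_type : Option Int) (mora_count : Int) : Decidable (D_get_pitch_pattern accent_type mora_count) := by unfold D_get_pitch_pattern; infer_instance

def Spec_get_pitch_pattern (accent_type : Option Int) (mora_count : Int) (out : List String) : Prop := ¬ D_get_pitch_pattern accent_type mora_count → out = get_pitch_pattern_alt accent_type mora_count
instance (accent_type : Option Int) (mora_count : Int) (out : List String) : Decidable (Spec_get_pitch_pattern accent_type mora_count out) := by unfold Spec_get_pitch_pattern D_get_pitch_pattern; infer_instance

def pvDiffWitness_get_pitch_pattern : Option Int × Int := (some 0, -1)
def pvDiffWitnessOut_get_pitch_pattern : (List String) × (List String) := (["L"], [])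

-- ===== CLAIM =====
def Claim_unchanged_get_pitch_pattern : Prop := ∀ (accent_type : Option Int) (mora_count : Int), Dom_get_pitch_pattern accent_type mora_count → Spec_get_pitch_pattern accent_type mora_count (get_pitch_pattern accent_type mora_count)
def Claim_changed_get_pitch_pattern : Prop := Dom_get_pitch_pattern (pvDiffWitness_get_pitch_pattern.1) (pvDiffWitness_get_pitch_pattern.2) ∧ D_get_pitch_pattern (pvDiffWitness_get_pitch_pattern.1) (pvDiffWitness_get_pitch_pattern.2) ∧ get_pitch_pattern (pvDiffWitness_get_pitch_pattern.1) (pvDiffWitness_get_pitch_pattern.2) = pvDiffWitnessOut_get_pitch_pattern.1 ∧ get_pitch_pattern_alt (pvDiffWitness_get_pitch_pattern.1) (pvDiffWitness_get_pitch_pattern.2) = pvDiffWitnessOut_get_pitch_pattern.2 ∧ pvDiffWitnessOut_get_pitch_pattern.1 ≠ pvDiffWitnessOut_get_pitch_pattern.2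
def Claim_exact_get_pitch_pattern : Prop := ∀ (accent_type : Option Int) (mora_count : Int), Dom_get_pitch_pattern accent_type mora_count → D_get_pitch_pattern accent_type mora_count → get_pitch_pattern accent_type mora_count ≠ get_pitch_pattern_alt accent_type mora_count

-- ===== LEMMAS AND PROOFS =====

-- A's foldl loop (case a ≥ 2, n ≥ 2) written as H-block then L-block.
theorem loopA_blocks (a n : Int) (ha : 2 ≤ a) (hn : 2 ≤ n) :
    (PySem.List.pyRange 2 (n + 1) 1).foldl
      (fun pattern i => pattern ++ [if i ≤ a then "H" else "L"]) ["L"] =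
    ["L"] ++ List.replicate (min a n - 1).toNat "H" ++ List.replicate (n - min a n).toNat "L" := by
  rw [PySem.List.foldl_append_singleton_eq_map]
  rw [PySem.List.pyRange_one_append 2 (min a n + 1) (n + 1) (by omega) (by omega)]
  rw [List.map_append, List.append_assoc]
  have hH : (PySem.List.pyRange 2 (min a n + 1) 1).map (fun i => if i ≤ a then "H" else "L")
      = List.replicate (min a n - 1).toNat "H" := by
    apply List.eq_replicate_iff.mpr
    refine ⟨by simp [PySem.List.length_pyRange_one] <;> omega, ?_⟩
    intro x hx
    rcases List.mem_map.mp hx with ⟨i, hi, rfl⟩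
    rcases (PySem.List.mem_pyRange_one).mp hi with ⟨h1, h2⟩
    rw [if_pos (by omega)]
  have hL : (PySem.List.pyRange (min a n + 1) (n + 1) 1).map (fun i => if i ≤ a then "H" else "L")
      = List.replicate (n - min a n).toNat "L" := by
    apply List.eq_replicate_iff.mpr
    refine ⟨by simp [PySem.List.length_pyRange_one] <;> omega, ?_⟩
    intro x hx
    rcases List.mem_map.mp hx with ⟨i, hi, rfl⟩
    rcases (PySem.List.mem_pyRange_one).mp hi with ⟨h1, h2⟩
    rw [if_neg (by omega)]
  rw [hH, hL]

-- B with the normalized accent 0 (heiban) and n ≥ 0 in closed form.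
theorem alt_a0 (accent_type : Option Int) (n : Int)
    (hnorm : (match accent_type with
      | none => (0:Int)
      | some v => if v < 0 then 0 else v) = 0) (hn : 0 ≤ n) :
    get_pitch_pattern_alt accent_type n =
      List.replicate (min 1 n).toNat "L" ++ List.replicate (n - 1).toNat "H" := by
  unfold get_pitch_pattern_alt
  rw [hnorm]
  norm_num

-- B with the normalized accent 1 (atamadaka) and n ≥ 0 in closed form.
theorem alt_a1 (accent_type : Option Int) (n : Int)
    (hnorm : (match accent_type with
      | none => (0:Int)
      | some v => if v < 0 then 0 else v) = 1) (hn : 0 ≤ n) :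
    get_pitch_pattern_alt accent_type n =
      List.replicate (min 1 n).toNat "H" ++ List.replicate (n - 1).toNat "L" := by
  unfold get_pitch_pattern_alt
  rw [hnorm]
  norm_num

-- B with a normalized accent a ≥ 2 (nakadaka/odaka) and n ≥ 0 in closed form.
theorem alt_a2 (accent_type : Option Int) (n a : Int)
    (hnorm : (match accent_type with
      | none => (0:Int)
      | some v => if v < 0 then 0 else v) = a) (ha : 2 ≤ a) (hn : 0 ≤ n) :
    get_pitch_pattern_alt accent_type n =
      List.replicate (min 1 n).toNat "L" ++ List.replicate (min a n - 1).toNat "H"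
        ++ List.replicate (n - min a n).toNat "L" := by
  unfold get_pitch_pattern_alt
  rw [hnorm]
  simp only [if_neg (by omega : ¬ a = 1), if_neg (by omega : ¬ a = 0)]
  norm_num
  omega

theorem get_pitch_pattern_spec : Claim_unchanged_get_pitch_pattern := by
  intro accent_type mora_count hdom
  clear hdom
  unfold Spec_get_pitch_pattern
  intro hD
  unfold D_get_pitch_pattern at hD
  have hm : 0 ≤ mora_count := by omega
  obtain ⟨a, ha⟩ : ∃ a : Int, (match accent_type with
      | none => (0:Int)
      | some v => if v < 0 then 0 else v) = a := ⟨_, rfl⟩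
  have ha0 : 0 ≤ a := by
    rw [← ha]; cases accent_type with
    | none => simp
    | some v => simp only []; split <;> omega
  unfold get_pitch_pattern
  simp only []
  rw [ha]
  by_cases h1 : a = 1
  · -- atamadaka; a = 1 forces accent_type = some 1
    have hat : accent_type = some 1 := by
      cases accent_type with
      | none => simp at ha; omega
      | some v =>
        simp only [] at ha
        have : v = 1 := by split at ha <;> omega
        rw [this]
    rw [alt_a1 accent_type mora_count (by rw [ha, h1]) hm]
    by_cases h0 : mora_count = 0
    · subst h0; simp
    · by_cases hone : mora_count = 1
      · subst hone
        rw [if_neg (by decide : ¬ (1:Int) = 0), if_pos rfl, if_pos hat]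
        have : (min (1:Int) 1).toNat = 1 := by omega
        rw [this]
        simp
      · rw [if_neg h0, if_neg hone, if_neg (by omega : ¬ a = 0), if_pos h1]
        have : (min (1:Int) mora_count).toNat = 1 := by omega
        rw [this]
        simp
  · have hat : ¬ accent_type = some 1 := by
      rintro rfl
      simp only [] at ha
      norm_num at ha
      omega
    by_cases h0a : a = 0
    · -- heiban (accent None, negative, or 0)
      rw [alt_a0 accent_type mora_count (by rw [ha, h0a]) hm]
      by_cases h0 : mora_count = 0
      · subst h0; simp
      · by_cases hone : mora_count = 1
        · subst hone
          rw [if_neg (by decide : ¬ (1:Int) = 0), if_pos rfl, if_neg hat]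
          have e1 : (min (1:Int) 1).toNat = 1 := by omega
          have e2 : ((1:Int) - 1).toNat = 0 := by omega
          rw [e1, e2]
          simp
        · rw [if_neg h0, if_neg hone, if_pos h0a]
          have : (min (1:Int) mora_count).toNat = 1 := by omega
          rw [this]
          simp
    · -- a ≥ 2
      have ha2 : 2 ≤ a := by omega
      rw [alt_a2 accent_type mora_count a ha ha2 hm]
      by_cases h0 : mora_count = 0
      · subst h0; simp; omega
      · by_cases hone : mora_count = 1
        · subst hone
          rw [if_neg (by decide : ¬ (1:Int) = 0), if_pos rfl, if_neg hat]
          have e1 : (min (1:Int) 1).toNat = 1 := by omega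
          have e2 : (min a 1 - 1).toNat = 0 := by omega
          have e3 : ((1:Int) - min a 1).toNat = 0 := by omega
          rw [e1, e2, e3]
          simp
        · rw [if_neg h0, if_neg hone, if_neg h0a, if_neg h1]
          rw [loopA_blocks a mora_count ha2 (by omega)]
          have e1 : (min (1:Int) mora_count).toNat = 1 := by omega
          rw [e1]
          simp

-- ===== VERDICT =====
theorem get_pitch_pattern_changed : Claim_changed_get_pitch_pattern := by unfold Claim_changed_get_pitch_pattern; decide

theorem get_pitch_pattern_tight : Claim_exact_get_pitch_pattern := by
  intro accent_type mora_count hdom hD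
  clear hdom
  unfold D_get_pitch_pattern at hD
  have hb : get_pitch_pattern_alt accent_type mora_count = [] := by
    obtain ⟨a, ha⟩ : ∃ a : Int, (match accent_type with
        | none => (0:Int)
        | some v => if v < 0 then 0 else v) = a := ⟨_, rfl⟩
    unfold get_pitch_pattern_alt
    simp only []
    rw [ha]
    by_cases h1 : a = 1
    · rw [if_pos h1, if_pos h1]
      have e1 : (min ((1:Int) - 1) mora_count).toNat = 0 := by omega
      have e2 : (min (1:Int) mora_count - (1 - 1)).toNat = 0 := by omega
      have e3 : (mora_count - max 1 ((1:Int) - 1)).toNat = 0 := by omega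
      rw [e1, e2, e3]; simp
    · by_cases h0 : a = 0
      · rw [if_neg h1, if_neg h1, if_pos h0]
        have e1 : (min ((2:Int) - 1) mora_count).toNat = 0 := by omega
        have e2 : (min mora_count mora_count - ((2:Int) - 1)).toNat = 0 := by omega
        have e3 : (mora_count - max mora_count ((2:Int) - 1)).toNat = 0 := by omega
        rw [e1, e2, e3]; simp
      · rw [if_neg h1, if_neg h1, if_neg h0]
        have e1 : (min ((2:Int) - 1) mora_count).toNat = 0 := by omega
        have e2 : (min (min a mora_count) mora_count - ((2:Int) - 1)).toNat = 0 := by omega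
        have e3 : (mora_count - max (min a mora_count) ((2:Int) - 1)).toNat = 0 := by omega
        rw [e1, e2, e3]; simp
  have hne : get_pitch_pattern accent_type mora_count ≠ [] := by
    unfold get_pitch_pattern
    simp only [if_neg (by omega : ¬ mora_count = 0), if_neg (by omega : ¬ mora_count = 1)]
    split <;> split_ifs <;> simp
  rw [hb]; exact hne
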